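-- pv_equiv track=rewrite | github.com/michaelmech/Pluribass | data_gen.py | remaining_to_act
-- ===== SOURCE A (Python) =====
-- from typing import List, Tuple, Dict, Any
-- from typing import List, Tuple, Dict, Any
-- from typing import Optional, Tuple, List, Dict
-- from typing import List, Dict
-- from typing import List, Tuple, Dict, Any
-- from typing import List, Tuple, Dict, Any, Optional
-- from typing import Optional, Tuple, List
--
-- def determine_phase(action_idx, actions):
--     board_card_actions = [i for i, a in enumerate(actions) if a.startswith('d db')]
--     if not board_card_actions:
--         return 'preflop'
--     elif action_idx < board_card_actions[0]:
--         return 'preflop'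
--     elif len(board_card_actions) == 1 or action_idx < board_card_actions[1]:
--         return 'flop'
--     elif len(board_card_actions) == 2 or action_idx < board_card_actions[2]:
--         return 'turn'
--     else:
--         return 'river'
--
-- def remaining_to_act(past: List[str], phase: str, live: set[str]) -> List[str]:
--     """Return players who still have to act on *this street*, in order (sorted tag order).
--     Mirrors the logic in get_relative_position but returns the list.
--     """
--     acted: set[str] = set()
--     for i in range(len(past) - 1, -1, -1):
--         a = past[i]
--         if determine_phase(i, past) != phase:
--             break
--         acted.add(a.split()[0])
--     return [p for p in sorted(live) if p not in acted]
-- ===== SOURCE B (Python) =====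
-- from typing import List
--
--
-- def remaining_to_act(past: List[str], phase: str, live: set) -> List[str]:
--     """Return players who still have to act on *this street*, in order (sorted tag order).
--
--     Boundary formulation: the board-deal actions ('d db ...') partition *past* into
--     phase blocks; the current phase is named by how many deals there are (capped
--     at 3), and the current block is the suffix starting at the last relevant
--     deal.  Only if the requested phase IS the current phase does anyone count as
--     having acted, namely the actors of that suffix block.
--     """
--     deals = [i for i, a in enumerate(past) if a.startswith('d db')]
--     c = min(len(deals), 3)
--     names = ['preflop', 'flop', 'turn', 'river']
--     acted = set()
--     if phase == names[c]:
--         start = deals[c - 1] if c else 0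
--         for a in past[start:]:
--             acted.add(a.split()[0])
--     return [p for p in sorted(live) if p not in acted]
-- ===== Notes on version B (the rewrite author's own statement) =====
-- stated objective: alternative
-- what changed: A walks backward over past recomputing determine_phase (which rebuilds the full board-deal index list) for every scanned element and breaks on a phase change; B scans past once for the deal indices, names the current phase from their count, computes the start of the last phase block, and collects actors in a single forward pass over that suffix slice.
import Mathlib
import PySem

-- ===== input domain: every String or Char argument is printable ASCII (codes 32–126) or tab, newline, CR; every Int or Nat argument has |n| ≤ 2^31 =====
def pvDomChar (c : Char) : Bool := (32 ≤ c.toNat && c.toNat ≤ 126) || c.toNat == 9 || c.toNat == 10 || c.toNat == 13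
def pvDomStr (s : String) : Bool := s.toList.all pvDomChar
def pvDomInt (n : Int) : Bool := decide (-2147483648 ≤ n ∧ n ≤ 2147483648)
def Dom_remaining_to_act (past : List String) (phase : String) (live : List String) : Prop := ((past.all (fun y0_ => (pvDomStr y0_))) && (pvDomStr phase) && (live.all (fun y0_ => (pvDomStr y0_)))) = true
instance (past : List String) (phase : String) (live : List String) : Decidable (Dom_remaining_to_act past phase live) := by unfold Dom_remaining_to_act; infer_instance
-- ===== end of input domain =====

-- B replaces A's backward loop with per-element phase recomputation by one forward pass
-- over the deal-index boundaries plus a suffix scan (a different decomposition of the same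
-- task). Return-value equivalence; neither program mutates its arguments.

-- ===== PORT A =====

-- shared sub-expression of both Pythons: [i for i, a in enumerate(xs) if a.startswith('d db')]
def pvDeals (actions : List String) : List Nat :=
  (List.range actions.length).filter (fun j => PySem.Str.startswith (actions.getD j "") "d db")

-- a.split()[0]; the default "" is never read under Pre_ (Python raises IndexError exactly
-- when a.split() is empty, and Pre_ excludes those inputs)
def pvTok (a : String) : String := (PySem.Str.split₀ a).headD ""

-- literal port of determine_phase; indices are Nat (Python's are the nonnegative ints 0..len-1);
-- headD/getD defaults are never read: each board[k] access is guarded by the length tests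
def determine_phase (action_idx : Nat) (actions : List String) : String :=
  let board := pvDeals actions
  if board.isEmpty then "preflop"
  else if action_idx < board.headD 0 then "preflop"
  else if board.length = 1 || decide (action_idx < board.getD 1 0) then "flop"
  else if board.length = 2 || decide (action_idx < board.getD 2 0) then "turn"
  else "river"

-- the backward loop 'for i in range(len(past)-1, -1, -1)' with its break, i = fuel - 1
def pvLoopA (past : List String) (phase : String) : Nat → PySem.Set String → PySem.Set String
  | 0, acted => acted
  | i + 1, acted =>
      let a := past.getD i ""          -- past[i], in range
      if determine_phase i past ≠ phase then acted
      else pvLoopA past phase i (PySem.Set.add acted (pvTok a))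

def remaining_to_act (past : List String) (phase : String) (live : List String) : List String :=
  (PySem.List.sorted live (fun p => p) false).filter
    (fun p => !(PySem.Set.contains (pvLoopA past phase past.length PySem.Set.empty) p))

-- ===== PORT B =====

def pvNames : List String := ["preflop", "flop", "turn", "river"]

-- c = min(len(deals), 3)
def pvCur (past : List String) : Nat := min (pvDeals past).length 3

-- start = deals[c - 1] if c else 0   (getD default never read: c - 1 < len(deals) when c ≠ 0)
def pvStart (past : List String) : Nat :=
  if pvCur past = 0 then 0 else (pvDeals past).getD (pvCur past - 1) 0

-- past[start:] is List.drop start (0 ≤ start ≤ len past, so exact)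
def remaining_to_act_alt (past : List String) (phase : String) (live : List String) : List String :=
  (PySem.List.sorted live (fun p => p) false).filter
    (fun p => !(PySem.Set.contains
      (if phase = pvNames.getD (pvCur past) "" then
        (past.drop (pvStart past)).foldl (fun s a => PySem.Set.add s (pvTok a)) PySem.Set.empty
      else PySem.Set.empty) p))

-- ===== PRECONDITION & SPEC =====
-- Pre_ excludes exactly the inputs where Python A raises IndexError: the requested phase is the
-- current one and some action in the current (suffix) phase block is empty/whitespace-only, so
-- a.split()[0] fails. (B raises there too.)
def Pre_remaining_to_act (past : List String) (phase : String) (live : List String) : Prop :=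
  phase = pvNames.getD (pvCur past) "" →
    ∀ a ∈ past.drop (pvStart past), PySem.Str.split₀ a ≠ []
instance (past : List String) (phase : String) (live : List String) : Decidable (Pre_remaining_to_act past phase live) := by unfold Pre_remaining_to_act; infer_instance

def pvWitness_remaining_to_act : List String × String × List String :=
  (["p1 cc", "d db AhKs2c", "p2 cc"], "flop", ["p2", "p1"])

def Spec_remaining_to_act (past : List String) (phase : String) (live : List String) (out : List String) : Prop := out = remaining_to_act_alt past phase live
instance (past : List String) (phase : String) (live : List String) (out : List String) : Decidable (Spec_remaining_to_act past phase live out) := by unfold Spec_remaining_to_act; infer_instance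

-- ===== CLAIM (what is proved, stated in full; the proofs are below) =====
def Claim_equal_remaining_to_act : Prop := ∀ (past : List String) (phase : String) (live : List String), Dom_remaining_to_act past phase live → Pre_remaining_to_act past phase live → Spec_remaining_to_act past phase live (remaining_to_act past phase live)

-- ===== LEMMAS AND PROOFS =====

theorem pvDeals_pairwise (past : List String) : (pvDeals past).Pairwise (· < ·) :=
  List.Pairwise.filter _ (List.pairwise_lt_range)

theorem pvDeals_lt {past : List String} {d : Nat} (h : d ∈ pvDeals past) : d < past.length := by
  simpa [pvDeals, List.mem_filter, List.mem_range] using And.left (List.mem_filter.mp h)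

-- number of deals at index ≤ i
def pvCnt (past : List String) (i : Nat) : Nat :=
  (pvDeals past).countP (fun d => decide (d ≤ i))

theorem dp_char (past : List String) (i : Nat) :
    determine_phase i past = pvNames.getD (min (pvCnt past i) 3) "" := by
  have hs := pvDeals_pairwise past
  unfold determine_phase pvCnt
  rcases hD : pvDeals past with _ | ⟨d0, _ | ⟨d1, _ | ⟨d2, rest⟩⟩⟩ <;> rw [hD] at hs
  · simp [pvNames]
  · by_cases h0 : i < d0
    · have h : List.countP (fun d => decide (d ≤ i)) [d0] = 0 := by
        simp only [List.countP_cons, List.countP_nil]; split_ifs <;> simp_all <;> omega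
      simp [pvNames, h0, h]
    · have h : List.countP (fun d => decide (d ≤ i)) [d0] = 1 := by
        simp only [List.countP_cons, List.countP_nil]; split_ifs <;> simp_all <;> omega
      simp [pvNames, h0, h]
  · have h01 : d0 < d1 := by simp [List.pairwise_cons] at hs; omega
    by_cases h0 : i < d0
    · have h : List.countP (fun d => decide (d ≤ i)) [d0, d1] = 0 := by
        simp only [List.countP_cons, List.countP_nil]; split_ifs <;> simp_all <;> omega
      simp [pvNames, h0, h]
    · by_cases h1 : i < d1
      · have h : List.countP (fun d => decide (d ≤ i)) [d0, d1] = 1 := by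
          simp only [List.countP_cons, List.countP_nil]; split_ifs <;> simp_all <;> omega
        simp [pvNames, h0, h1, h]
      · have h : List.countP (fun d => decide (d ≤ i)) [d0, d1] = 2 := by
          simp only [List.countP_cons, List.countP_nil]; split_ifs <;> simp_all <;> omega
        simp [pvNames, h0, h1, h]
  · have h01 : d0 < d1 := by simp [List.pairwise_cons] at hs; omega
    have h12 : d1 < d2 := by
      have := hs.tail; simp [List.pairwise_cons] at this; omega
    have hrest : ∀ x ∈ rest, d2 < x := by
      have := hs.tail.tail; simp [List.pairwise_cons] at this; exact fun x hx => this.1 x hx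
    by_cases h2 : i < d2
    · have hr0 : rest.countP (fun d => decide (d ≤ i)) = 0 :=
        List.countP_eq_zero.mpr (fun x hx => by have := hrest x hx; simp; omega)
      by_cases h0 : i < d0
      · have h : List.countP (fun d => decide (d ≤ i)) (d0 :: d1 :: d2 :: rest) = 0 := by
          simp only [List.countP_cons, hr0]; split_ifs <;> simp_all <;> omega
        simp [pvNames, h0, h]
      · by_cases h1 : i < d1
        · have h : List.countP (fun d => decide (d ≤ i)) (d0 :: d1 :: d2 :: rest) = 1 := by
            simp only [List.countP_cons, hr0]; split_ifs <;> simp_all <;> omega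
          simp [pvNames, h0, h1, h]
        · have h : List.countP (fun d => decide (d ≤ i)) (d0 :: d1 :: d2 :: rest) = 2 := by
            simp only [List.countP_cons, hr0]; split_ifs <;> simp_all <;> omega
          simp [pvNames, h0, h1, h2, h]
    · have h : min (List.countP (fun d => decide (d ≤ i)) (d0 :: d1 :: d2 :: rest)) 3 = 3 := by
        simp only [List.countP_cons]; split_ifs <;> simp_all <;> omega
      have ha : ¬ i < d0 := by omega
      have hb : ¬ i < d1 := by omega
      simp [pvNames, ha, hb, h2, h]

theorem cnt_ge_iff {D : List Nat} (hs : D.Pairwise (· < ·)) :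
    ∀ {c : Nat}, 1 ≤ c → c ≤ D.length → ∀ i : Nat,
      (c ≤ D.countP (fun d => decide (d ≤ i)) ↔ D.getD (c - 1) 0 ≤ i) := by
  induction D with
  | nil => intro c h1 h2 i; simp at h2; omega
  | cons d tl ih =>
    intro c h1 h2 i
    have hd : ∀ x ∈ tl, d < x := (List.pairwise_cons.mp hs).1
    have htl := (List.pairwise_cons.mp hs).2
    by_cases hc : c = 1
    · subst hc
      simp only [List.countP_cons, Nat.sub_self, List.getD_cons_zero]
      constructor
      · intro h
        by_contra hdi
        have h0 : tl.countP (fun d => decide (d ≤ i)) = 0 :=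
          List.countP_eq_zero.mpr (fun x hx => by have := hd x hx; simp; omega)
        rw [h0, if_neg (by simpa using hdi)] at h
        omega
      · intro h
        rw [if_pos (by simpa using h)]
        omega
    · obtain ⟨c', rfl⟩ : ∃ c', c = c' + 1 := ⟨c - 1, by omega⟩
      have hc1 : 1 ≤ c' := by omega
      simp only [List.countP_cons]
      have hgd : (d :: tl).getD (c' + 1 - 1) 0 = tl.getD (c' - 1) 0 := by
        obtain ⟨k, rfl⟩ : ∃ k, c' = k + 1 := ⟨c' - 1, by omega⟩
        simp
      rw [hgd]
      have hlen : c' ≤ tl.length := by simpa using h2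
      by_cases hdi : d ≤ i
      · rw [if_pos (by simpa using hdi)]
        rw [← ih htl hc1 hlen i]
        omega
      · rw [if_neg (by simpa using hdi)]
        have h0 : tl.countP (fun d => decide (d ≤ i)) = 0 :=
          List.countP_eq_zero.mpr (fun x hx => by have := hd x hx; simp; omega)
        rw [h0]
        have hmem : tl.getD (c' - 1) 0 ∈ tl := by
          rw [List.getD_eq_getElem tl 0 (by omega)]
          exact List.getElem_mem _
        have := hd _ hmem
        constructor
        · intro h; omega
        · intro h; omega

theorem dp_eq_cur_iff (past : List String) (i : Nat) :
    determine_phase i past = pvNames.getD (pvCur past) "" ↔ pvStart past ≤ i := by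
  rw [dp_char]
  have hcnt_le : pvCnt past i ≤ (pvDeals past).length := List.countP_le_length
  have hinj : ∀ a b : Nat, a ≤ 3 → b ≤ 3 → pvNames.getD a "" = pvNames.getD b "" → a = b := by
    intro a b ha hb h
    interval_cases a <;> interval_cases b <;> simp_all [pvNames]
  have hmain : min (pvCnt past i) 3 = pvCur past ↔ pvStart past ≤ i := by
    by_cases hc : (pvDeals past).length = 0
    · have h0 : pvCnt past i = 0 := by omega
      have hcur : pvCur past = 0 := by unfold pvCur; omega
      simp [pvStart, hcur, h0]
    · have hc1 : 1 ≤ pvCur past := by unfold pvCur; omega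
      have key : (min (pvCnt past i) 3 = pvCur past) ↔ pvCur past ≤ pvCnt past i := by
        unfold pvCur at *; omega
      rw [key]
      unfold pvCnt
      rw [cnt_ge_iff (pvDeals_pairwise past) hc1 (Nat.min_le_left _ _) i]
      unfold pvStart
      rw [if_neg (by omega)]
  constructor
  · intro h
    exact hmain.mp (hinj _ _ (by omega) (Nat.min_le_right _ _) h)
  · intro h
    rw [hmain.mpr h]

theorem pvStart_lt (past : List String) (hn : past ≠ []) : pvStart past < past.length := by
  unfold pvStart
  split_ifs with hc
  · have : past.length ≠ 0 := fun h => hn (List.length_eq_zero_iff.mp h)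
    omega
  · have hc1 : 1 ≤ pvCur past := by omega
    have hlen : pvCur past ≤ (pvDeals past).length := Nat.min_le_left _ _
    have hmem : (pvDeals past).getD (pvCur past - 1) 0 ∈ pvDeals past := by
      rw [List.getD_eq_getElem _ 0 (by omega)]
      exact List.getElem_mem _
    exact pvDeals_lt hmem

theorem mem_fold (xs : List String) (p : String) : ∀ s : PySem.Set String,
    (p ∈ xs.foldl (fun s a => PySem.Set.add s (pvTok a)) s ↔ p ∈ s ∨ ∃ a ∈ xs, pvTok a = p) := by
  induction xs with
  | nil => intro s; simp
  | cons x xs ih =>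
    intro s
    rw [List.foldl_cons, ih]
    rw [PySem.Set.mem_add]
    constructor
    · rintro (⟨h | h⟩ | ⟨a, ha, h⟩)
      · exact Or.inl h
      · exact Or.inr ⟨x, by simp, h.symm⟩
      · exact Or.inr ⟨a, by simp [ha], h⟩
    · rintro (h | ⟨a, ha, h⟩)
      · exact Or.inl (Or.inl h)
      · rcases List.mem_cons.mp ha with rfl | ha'
        · exact Or.inl (Or.inr h.symm)
        · exact Or.inr ⟨a, ha', h⟩

theorem mem_loopA (past : List String) (phase : String) (p : String)
    (hph : phase = pvNames.getD (pvCur past) "") : ∀ (i : Nat) (acted : PySem.Set String),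
    pvStart past ≤ i → i ≤ past.length →
    (p ∈ pvLoopA past phase i acted ↔
      p ∈ acted ∨ ∃ j, pvStart past ≤ j ∧ j < i ∧ pvTok (past.getD j "") = p) := by
  intro i
  induction i with
  | zero =>
    intro acted _ _
    simp [pvLoopA]
  | succ i ih =>
    intro acted hs hn
    by_cases hsi : pvStart past ≤ i
    · have hdp : determine_phase i past = phase := by
        rw [hph]; exact (dp_eq_cur_iff past i).mpr hsi
      rw [pvLoopA, if_neg (by simp [hdp])]
      rw [ih _ hsi (by omega)]
      rw [PySem.Set.mem_add]
      constructor
      · rintro (⟨h | h⟩ | ⟨j, h1, h2, h3⟩)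
        · exact Or.inl h
        · exact Or.inr ⟨i, hsi, by omega, h.symm⟩
        · exact Or.inr ⟨j, h1, by omega, h3⟩
      · rintro (h | ⟨j, h1, h2, h3⟩)
        · exact Or.inl (Or.inl h)
        · by_cases hj : j = i
          · subst hj; exact Or.inl (Or.inr h3.symm)
          · exact Or.inr ⟨j, h1, by omega, h3⟩
    · have hdp : determine_phase i past ≠ phase := by
        rw [hph]
        intro h
        exact hsi ((dp_eq_cur_iff past i).mp h)
      rw [pvLoopA, if_pos (by simp [hdp])]
      constructor
      · intro h; exact Or.inl h
      · rintro (h | ⟨j, h1, h2, _⟩)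
        · exact h
        · omega

theorem loopA_empty (past : List String) (phase : String)
    (hph : phase ≠ pvNames.getD (pvCur past) "") :
    pvLoopA past phase past.length PySem.Set.empty = PySem.Set.empty := by
  rcases hpl : past.length with _ | m
  · simp [pvLoopA]
  · have hne : past ≠ [] := by
      intro h; rw [h] at hpl; simp at hpl
    have hlt : pvStart past ≤ m := by
      have := pvStart_lt past hne; omega
    have hdp : determine_phase m past = pvNames.getD (pvCur past) "" :=
      (dp_eq_cur_iff past m).mpr hlt
    rw [pvLoopA, if_pos (by rw [hdp]; exact fun h => hph h.symm)]

-- ===== VERDICT (by name: the statement is the Claim_ definition above) =====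
theorem remaining_to_act_spec : Claim_equal_remaining_to_act := by
  intro past phase live _ _
  unfold Spec_remaining_to_act remaining_to_act remaining_to_act_alt
  by_cases hph : phase = pvNames.getD (pvCur past) ""
  · apply List.filter_congr
    intro p _
    have hstart_le : pvStart past ≤ past.length := by
      rcases past with _ | ⟨x, xs⟩
      · simp [pvStart, pvCur, pvDeals]
      · exact Nat.le_of_lt (pvStart_lt _ (by simp))
    have hA := mem_loopA past phase p hph past.length PySem.Set.empty hstart_le le_rfl
    have hB := mem_fold (past.drop (pvStart past)) p PySem.Set.empty
    have hmem : p ∈ pvLoopA past phase past.length PySem.Set.empty ↔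
        p ∈ (past.drop (pvStart past)).foldl (fun s a => PySem.Set.add s (pvTok a)) PySem.Set.empty := by
      rw [hA, hB]
      have hemp : p ∈ (PySem.Set.empty : PySem.Set String) ↔ False := by
        simp [PySem.Set.empty]
      rw [hemp]
      simp only [false_or]
      constructor
      · rintro ⟨j, h1, h2, h3⟩
        refine ⟨past.getD j "", ?_, h3⟩
        have hj : j - pvStart past < (past.drop (pvStart past)).length := by
          simp [List.length_drop]; omega
        have : (past.drop (pvStart past))[j - pvStart past] = past[j]'(by omega) := by
          rw [List.getElem_drop]
          congr 1
          omega
        rw [List.getD_eq_getElem _ "" (by omega), ← this]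
        exact List.getElem_mem _
      · rintro ⟨a, ha, h3⟩
        obtain ⟨k, hk, hak⟩ := List.mem_iff_getElem.mp ha
        have hklen : k < past.length - pvStart past := by
          simpa [List.length_drop] using hk
        refine ⟨pvStart past + k, by omega, by omega, ?_⟩
        rw [List.getD_eq_getElem _ "" (by omega)]
        rw [← List.getElem_drop]
        · rw [hak, h3]
        · exact hk
    have hcont : PySem.Set.contains (pvLoopA past phase past.length PySem.Set.empty) p =
        PySem.Set.contains ((past.drop (pvStart past)).foldl (fun s a => PySem.Set.add s (pvTok a)) PySem.Set.empty) p := by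
      rw [Bool.eq_iff_iff, PySem.Set.contains_iff, PySem.Set.contains_iff]
      exact hmem
    rw [if_pos hph, hcont]
  · simp only [loopA_empty past phase hph, if_neg hph]
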